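-- pv_equiv track=rewrite | github.com/pazhanir/smarteefi-homeassistant | tools/smarteefi_scanner.py | format_channel_status
-- ===== SOURCE A (Python) =====
-- def format_channel_status(switchmap: int, status: int) -> str:
--     """Format individual channel states from switchmap and status bitmasks."""
--     channels = []
--     for bit in range(32):
--         mask = 1 << bit
--         if switchmap & mask:
--             state = "ON" if (status & mask) else "OFF"
--             channels.append(f"ch{bit}(map={mask})={'ON' if (status & mask) else 'OFF'}")
--     return ", ".join(channels) if channels else "none"
-- ===== SOURCE B (Python) =====
-- def format_channel_status(switchmap: int, status: int) -> str:
--     """Format individual channel states from switchmap and status bitmasks.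
--
--     Iterates only over the SET bits of the low 32 bits, peeling off the
--     lowest set bit each round, instead of scanning all 32 positions.
--     """
--     m = switchmap & 0xFFFFFFFF
--     parts = []
--     while m:
--         rest = m & (m - 1)          # m with its lowest set bit cleared
--         lsb = m - rest              # the lowest set bit itself (a power of two)
--         bit = lsb.bit_length() - 1
--         parts.append(f"ch{bit}(map={lsb})={'ON' if status & lsb else 'OFF'}")
--         m = rest
--     return ", ".join(parts) if parts else "none"
-- ===== Notes on version B (the rewrite author's own statement) =====
-- stated objective: alternative
-- what changed: B masks the input to its low 32 bits once and then loops only over the SET bits, peeling off the lowest set bit each round with m & (m-1) and recovering its position via bit_length, instead of A's fixed scan over all 32 bit positions with a shifted mask.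
import Mathlib
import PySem

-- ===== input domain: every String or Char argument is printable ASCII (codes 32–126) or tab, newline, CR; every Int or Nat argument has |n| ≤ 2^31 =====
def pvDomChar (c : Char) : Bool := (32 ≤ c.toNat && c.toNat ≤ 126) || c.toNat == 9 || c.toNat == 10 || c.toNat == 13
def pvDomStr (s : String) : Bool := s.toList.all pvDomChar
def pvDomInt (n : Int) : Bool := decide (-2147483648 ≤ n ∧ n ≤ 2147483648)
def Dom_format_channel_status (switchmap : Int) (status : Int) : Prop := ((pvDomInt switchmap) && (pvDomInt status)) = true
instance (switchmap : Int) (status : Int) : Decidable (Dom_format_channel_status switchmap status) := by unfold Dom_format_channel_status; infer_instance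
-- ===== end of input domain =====

-- B iterates only over the set bits of switchmap & 0xFFFFFFFF, clearing the lowest set bit
-- each round with m & (m-1), instead of A's fixed scan over all 32 bit positions (alternative).


-- ===== PORT A =====
-- literal port: for bit in range(32): mask = 1 << bit; if switchmap & mask: append f"ch{bit}(map={mask})={'ON' if status & mask else 'OFF'}"
-- (bit ∈ [0,32) is nonnegative, so the shift amount bit.toNat is exact; Python's `if n:` on an int is `n ≠ 0`)
def format_channel_status (switchmap : Int) (status : Int) : String :=
  let channels : List String :=
    (PySem.List.pyRange 0 32 1).foldl
      (fun channels bit =>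
        let mask : Int := (1 : Int) <<< bit.toNat
        if PySem.Int.band switchmap mask ≠ 0 then
          channels ++ ["ch" ++ PySem.Int.toStr bit ++ "(map=" ++ PySem.Int.toStr mask ++ ")=" ++
            (if PySem.Int.band status mask ≠ 0 then "ON" else "OFF")]
        else channels) []
  if channels.isEmpty then "none" else PySem.Str.join ", " channels

-- ===== PORT B =====
-- literal port of Source B's while-loop: m & (m-1) clears the lowest set bit; lsb.bit_length()-1 is
-- Nat.log2 lsb (exact: lsb > 0 inside the loop); m = switchmap & 0xFFFFFFFF is ≥ 0, held as a Nat.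
def format_channel_status_altLoop (status : Int) (m : Nat) (parts : List String) : List String :=
  if h : m = 0 then parts
  else
    let rest := m &&& (m - 1)
    let lsb := m - rest
    let bit := Nat.log2 lsb
    format_channel_status_altLoop status rest
      (parts ++ ["ch" ++ PySem.Int.toStr (bit : Int) ++ "(map=" ++ PySem.Int.toStr (lsb : Int) ++ ")=" ++
        (if PySem.Int.band status (lsb : Int) ≠ 0 then "ON" else "OFF")])
termination_by m
decreasing_by
  exact Nat.lt_of_le_of_lt Nat.and_le_right (Nat.sub_lt (Nat.pos_of_ne_zero h) Nat.one_pos)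

def format_channel_status_alt (switchmap : Int) (status : Int) : String :=
  let m : Nat := (PySem.Int.band switchmap 4294967295).toNat
  let parts := format_channel_status_altLoop status m []
  if parts.isEmpty then "none" else PySem.Str.join ", " parts

-- ===== PRECONDITION & SPEC =====
def Spec_format_channel_status (switchmap : Int) (status : Int) (out : String) : Prop := out = format_channel_status_alt switchmap status
instance (switchmap : Int) (status : Int) (out : String) : Decidable (Spec_format_channel_status switchmap status out) := by unfold Spec_format_channel_status; infer_instance

-- ===== CLAIM (what is proved, stated in full; the proofs are below) =====
def Claim_equal_format_channel_status : Prop := ∀ (switchmap : Int) (status : Int), Dom_format_channel_status switchmap status → Spec_format_channel_status switchmap status (format_channel_status switchmap status)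

-- ===== LEMMAS AND PROOFS =====

-- the string both programs emit for channel k
def pvEntry (status : Int) (k : Nat) : String :=
  "ch" ++ PySem.Int.toStr (k : Int) ++ "(map=" ++ PySem.Int.toStr ((2 : Int) ^ k) ++ ")=" ++
    (if PySem.Int.band status ((2 : Int) ^ k) ≠ 0 then "ON" else "OFF")

-- a conditional-append fold is a filter-then-map
theorem pvFoldlIf {α β : Type} (P : α → Prop) [DecidablePred P] (f : α → β) :
    ∀ (l : List α) (acc : List β),
      l.foldl (fun acc x => if P x then acc ++ [f x] else acc) acc
        = acc ++ (l.filter (fun x => decide (P x))).map f := by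
  intro l
  induction l with
  | nil => intro acc; simp
  | cons x xs ih =>
    intro acc
    by_cases h : P x <;> simp [List.foldl_cons, h, ih]
-- A's accumulated channel list, in filter/map form
theorem pvAList (switchmap status : Int) :
    (PySem.List.pyRange 0 32 1).foldl
      (fun channels bit =>
        let mask : Int := (1 : Int) <<< bit.toNat
        if PySem.Int.band switchmap mask ≠ 0 then
          channels ++ ["ch" ++ PySem.Int.toStr bit ++ "(map=" ++ PySem.Int.toStr mask ++ ")=" ++
            (if PySem.Int.band status mask ≠ 0 then "ON" else "OFF")]
        else channels) []
    = ((List.range 32).filter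
        (fun k => decide (PySem.Int.band switchmap ((2 : Int) ^ k) ≠ 0))).map (pvEntry status) := by
  have hpow : ∀ k : Nat, ((1:Int) <<< (k:Int)) = (2:Int)^k := by
    intro k
    have h := Int.shiftLeft_natCast 1 k
    simpa [Nat.shiftLeft_eq] using h
  rw [PySem.List.pyRange_one]
  have h32 : ((32:Int) - 0).toNat = 32 := rfl
  rw [h32]
  dsimp only
  rw [pvFoldlIf (fun bit : Int => PySem.Int.band switchmap ((1:Int) <<< (↑bit.toNat : Int)) ≠ 0)
        (fun bit : Int => "ch" ++ PySem.Int.toStr bit ++ "(map=" ++ PySem.Int.toStr ((1:Int) <<< (↑bit.toNat : Int)) ++ ")=" ++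
            (if PySem.Int.band status ((1:Int) <<< (↑bit.toNat : Int)) ≠ 0 then "ON" else "OFF"))]
  rw [List.filter_map, List.map_map, List.nil_append]
  rw [List.filter_congr (q := fun k => decide (PySem.Int.band switchmap ((2 : Int) ^ k) ≠ 0)) ?_]
  · apply List.map_congr_left
    intro k hk
    simp [Function.comp_apply, pvEntry, zero_add, hpow]
  · intro k hk
    simp [Function.comp_apply, zero_add, hpow]

-- every nonzero Nat splits off its lowest set bit: m = 2^(k+1)*q + 2^k
theorem pvDecomp : ∀ m : Nat, m ≠ 0 → ∃ k q, m = 2 ^ (k + 1) * q + 2 ^ k := by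
  intro m
  induction m using Nat.strong_induction_on with
  | _ m ih =>
    intro hm
    rcases Nat.even_or_odd m with he | ho
    · have h2 : m / 2 ≠ 0 := by
        rcases he with ⟨t, ht⟩
        omega
      have hlt : m / 2 < m := Nat.div_lt_self (Nat.pos_of_ne_zero hm) (by norm_num)
      obtain ⟨k, q, hkq⟩ := ih (m / 2) hlt h2
      refine ⟨k + 1, q, ?_⟩
      have hm2 : m = 2 * (m / 2) := by
        rcases he with ⟨t, ht⟩; omega
      calc m = 2 * (2 ^ (k + 1) * q + 2 ^ k) := by rw [hm2, hkq]
        _ = 2 ^ (k + 1 + 1) * q + 2 ^ (k + 1) := by ring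
    · refine ⟨0, m / 2, ?_⟩
      rcases ho with ⟨t, ht⟩
      omega
-- m & (m-1) clears the lowest set bit
theorem pvRest (k q : Nat) :
    (2 ^ (k + 1) * q + 2 ^ k) &&& (2 ^ (k + 1) * q + 2 ^ k - 1) = 2 ^ (k + 1) * q := by
  have h1 : (1:Nat) ≤ 2 ^ k := Nat.one_le_two_pow
  have hlt : 2 ^ k < 2 ^ (k+1) := by
    have := Nat.pow_lt_pow_right (a := 2) (by norm_num) (Nat.lt_succ_self k)
    simpa using this
  have hlt' : 2 ^ k - 1 < 2 ^ (k+1) := by omega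
  have hsub : 2 ^ (k + 1) * q + 2 ^ k - 1 = 2 ^ (k + 1) * q + (2 ^ k - 1) := by omega
  apply Nat.eq_of_testBit_eq
  intro j
  rw [Nat.testBit_and, hsub,
      Nat.testBit_two_pow_mul_add q hlt j,
      Nat.testBit_two_pow_mul_add q hlt' j]
  have hq : (2 ^ (k+1) * q).testBit j = (decide (k+1 ≤ j) && q.testBit (j - (k+1))) := by
    rw [Nat.mul_comm, Nat.testBit_mul_two_pow]
  rw [hq]
  by_cases hj : j < k + 1
  · rw [if_pos hj, if_pos hj]
    have hn : ¬ (k + 1 ≤ j) := by omega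
    simp only [Nat.testBit_two_pow, Nat.testBit_two_pow_sub_one, hn, decide_false,
      Bool.false_and, Bool.and_eq_false_iff]
    by_cases hkj : k = j
    · right; simp [hkj]
    · left; simp [hkj]
  · rw [if_neg hj, if_neg hj]
    simp [Nat.not_lt.mp hj]

-- peeling the lowest set bit peels the head of the set-bit list
theorem pvFilterStep (k q : Nat) (h32 : 2 ^ (k + 1) * q + 2 ^ k < 2 ^ 32) :
    (List.range 32).filter (2 ^ (k + 1) * q + 2 ^ k).testBit
      = k :: (List.range 32).filter (2 ^ (k + 1) * q).testBit := by
  have h1 : (1:Nat) ≤ 2 ^ k := Nat.one_le_two_pow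
  have hlt : 2 ^ k < 2 ^ (k+1) := by
    have := Nat.pow_lt_pow_right (a := 2) (by norm_num) (Nat.lt_succ_self k)
    simpa using this
  have hk32 : k < 32 := by
    by_contra h
    have : (2:Nat) ^ 32 ≤ 2 ^ k := Nat.pow_le_pow_right (by norm_num) (by omega)
    omega
  -- pointwise descriptions of the two testBit functions
  have hm : ∀ j, (2 ^ (k + 1) * q + 2 ^ k).testBit j
      = if j < k + 1 then decide (k = j) else q.testBit (j - (k+1)) := by
    intro j
    rw [Nat.testBit_two_pow_mul_add q hlt j]
    by_cases hj : j < k + 1 <;> simp [hj, Nat.testBit_two_pow]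
  have hr : ∀ j, (2 ^ (k + 1) * q).testBit j
      = if j < k + 1 then false else q.testBit (j - (k+1)) := by
    intro j
    rw [Nat.mul_comm, Nat.testBit_mul_two_pow]
    by_cases hj : j < k + 1 <;> simp [hj] <;> omega
  have hsplit : (32:Nat) = (k+1) + (31 - k) := by omega
  rw [hsplit, List.range_add, List.filter_append, List.filter_append,
      List.range_succ, List.filter_append, List.filter_append]
  have e1 : (List.range k).filter (2 ^ (k + 1) * q + 2 ^ k).testBit = [] := by
    rw [List.filter_eq_nil_iff]
    intro j hj
    have hjk : j < k := List.mem_range.mp hj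
    rw [hm j, if_pos (by omega)]
    simp; omega
  have e2 : ([k] : List Nat).filter (2 ^ (k + 1) * q + 2 ^ k).testBit = [k] := by
    simp [List.filter, hm k]
  have e3 : (List.range (k+1)).filter (2 ^ (k + 1) * q).testBit = [] := by
    rw [List.filter_eq_nil_iff]
    intro j hj
    have hjk : j < k + 1 := List.mem_range.mp hj
    rw [hr j, if_pos hjk]
    simp
  have e4 : ((List.range (31 - k)).map (fun x => (k+1) + x)).filter (2 ^ (k + 1) * q + 2 ^ k).testBit
      = ((List.range (31 - k)).map (fun x => (k+1) + x)).filter (2 ^ (k + 1) * q).testBit := by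
    apply List.filter_congr
    intro x hx
    obtain ⟨j, _, rfl⟩ := List.mem_map.mp hx
    rw [hm, hr, if_neg (by omega), if_neg (by omega)]
  rw [e1, e2, e4]
  rw [List.range_succ, List.filter_append] at e3
  rcases List.append_eq_nil_iff.mp e3 with ⟨e3a, e3b⟩
  rw [e3a, e3b]
  simp

-- B's loop emits exactly the entries of the set bits of m, in ascending order
theorem pvLoop (status : Int) :
    ∀ m : Nat, m < 2 ^ 32 → ∀ parts : List String,
      format_channel_status_altLoop status m parts
        = parts ++ ((List.range 32).filter m.testBit).map (pvEntry status) := by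
  intro m
  induction m using Nat.strong_induction_on with
  | _ m ih =>
    intro h32 parts
    by_cases hm : m = 0
    · subst hm
      rw [format_channel_status_altLoop]
      simp [Nat.zero_testBit]
    · obtain ⟨k, q, hkq⟩ := pvDecomp m hm
      have hrest : m &&& (m - 1) = 2 ^ (k + 1) * q := by rw [hkq]; exact pvRest k q
      have hlsb : m - (m &&& (m - 1)) = 2 ^ k := by
        rw [hrest, hkq]; exact Nat.add_sub_cancel_left _ _
      have hbit : Nat.log2 (m - (m &&& (m - 1))) = k := by
        rw [hlsb]; exact Nat.log2_two_pow
      have hrlt : m &&& (m - 1) < m := by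
        rw [hrest, hkq]; exact Nat.lt_add_of_pos_right (Nat.two_pow_pos k)
      rw [format_channel_status_altLoop, dif_neg hm]
      show format_channel_status_altLoop status (m &&& (m-1)) _ = _
      rw [ih (m &&& (m-1)) hrlt (by omega)]
      rw [hbit, hlsb]
      conv_rhs => rw [hkq, pvFilterStep k q (hkq ▸ h32), ← hrest]
      simp only [List.map_cons, pvEntry, List.append_assoc, List.cons_append, List.nil_append]
      push_cast
      rfl

-- PySem.Int.band with a negative left operand and a Nat right operand
theorem pvBandNeg (a : Int) (ha : a < 0) (b : Nat) :
    PySem.Int.band a (b : Int) = ((b - (b &&& (-a - 1).toNat) : Nat) : Int) := by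
  unfold PySem.Int.band
  rw [if_neg (by omega), if_pos (by positivity)]
  simp
-- the masked switchmap fits in 32 bits
theorem pvMlt (switchmap : Int) : (PySem.Int.band switchmap 4294967295).toNat < 2 ^ 32 := by
  by_cases hs : 0 ≤ switchmap
  · rw [PySem.Int.band_of_nonneg hs (by norm_num)]
    have : switchmap.toNat &&& (4294967295 : Int).toNat ≤ (4294967295 : Int).toNat :=
      Nat.and_le_right
    simp only [Int.toNat_natCast]
    norm_num at this ⊢
    omega
  · rw [show ((4294967295 : Int)) = ((4294967295 : Nat) : Int) from rfl,
        pvBandNeg switchmap (by omega) 4294967295]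
    simp only [Int.toNat_natCast]
    have : (4294967295 : Nat) - ((4294967295:Nat) &&& (-switchmap - 1).toNat) ≤ 4294967295 :=
      Nat.sub_le _ _
    omega
-- A's per-position test agrees with the set bits of the masked switchmap
theorem pvBridge (switchmap : Int) :
    ∀ k : Nat, k < 32 →
      decide (PySem.Int.band switchmap ((2 : Int) ^ k) ≠ 0)
        = ((PySem.Int.band switchmap 4294967295).toNat).testBit k := by
  intro k hk
  have hpow : ((2 : Int) ^ k) = (((2^k : Nat) : Int)) := by push_cast; ring
  have h2k : (2:Nat)^k ≠ 0 := (Nat.two_pow_pos k).ne'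
  by_cases hs : 0 ≤ switchmap
  · rw [hpow, PySem.Int.band_of_nonneg hs (by positivity),
        PySem.Int.band_of_nonneg hs (by norm_num)]
    simp only [Int.toNat_natCast, ne_eq, Int.natCast_eq_zero]
    rw [show ((4294967295 : Int)).toNat = 2^32 - 1 from rfl,
        Nat.testBit_and, Nat.testBit_two_pow_sub_one, Nat.and_two_pow]
    rcases Bool.eq_false_or_eq_true (switchmap.toNat.testBit k) with hb | hb <;>
      simp [hb, hk]
  · have hneg : switchmap < 0 := by omega
    rw [hpow, pvBandNeg switchmap hneg (2^k),
        show ((4294967295 : Int)) = ((4294967295 : Nat) : Int) from rfl,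
        pvBandNeg switchmap hneg 4294967295]
    simp only [Int.toNat_natCast, ne_eq, Int.natCast_eq_zero]
    set t := (-switchmap - 1).toNat with ht
    have hle : (4294967295:Nat) &&& t ≤ 4294967295 := Nat.and_le_left
    have hsub : (4294967295:Nat) - ((4294967295:Nat) &&& t) = 2^32 - (((4294967295:Nat) &&& t) + 1) := by omega
    rw [hsub, Nat.testBit_two_pow_sub_succ (by omega) k,
        show (4294967295:Nat) = 2^32 - 1 from rfl,
        Nat.testBit_and, Nat.testBit_two_pow_sub_one]
    have hand : (2^k) &&& t = (t.testBit k).toNat * 2^k := by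
      rw [Nat.and_comm, Nat.and_two_pow]
    rw [hand]
    rcases Bool.eq_false_or_eq_true (t.testBit k) with hb | hb <;>
      simp [hb, hk]

-- ===== VERDICT (by name: the statement is the Claim_ definition above) =====
theorem format_channel_status_spec : Claim_equal_format_channel_status := by
  intro switchmap status _
  unfold Spec_format_channel_status format_channel_status format_channel_status_alt
  dsimp only
  rw [pvAList switchmap status,
      pvLoop status _ (pvMlt switchmap) [],
      List.filter_congr (fun k hk => pvBridge switchmap k (by simpa using List.mem_range.mp hk))]
  simp
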